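-- pv_equiv track=rewrite | github.com/fastrizwaan/tts | moved/kq4.py | get_word_positions_in_sentence
-- ===== SOURCE A (Python) =====
-- def get_word_positions_in_sentence(sentence, sentence_start_pos):
--     """Get word positions within a sentence (keeping punctuation)"""
--     # Split into words while preserving punctuation positions
--     words = sentence.split()
--     word_positions = []
--     pos = 0
--
--     for word in words:
--         if word:  # Only process non-empty words
--             # Find the word in the original sentence
--             word_start = sentence.find(word, pos)
--             if word_start != -1:
--                 abs_start = sentence_start_pos + word_start
--                 abs_end = abs_start + len(word)
--                 word_positions.append((abs_start, abs_end))
--                 pos = word_start + len(word)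
--     return word_positions
-- ===== SOURCE B (Python) =====
-- def get_word_positions_in_sentence(sentence, sentence_start_pos):
--     """Get word positions within a sentence (keeping punctuation)"""
--     positions = []
--     start = None
--     for i, ch in enumerate(sentence):
--         if ch.isspace():
--             if start is not None:
--                 positions.append((sentence_start_pos + start, sentence_start_pos + i))
--                 start = None
--         elif start is None:
--             start = i
--     if start is not None:
--         positions.append((sentence_start_pos + start, sentence_start_pos + len(sentence)))
--     return positions
-- ===== Notes on version B (the rewrite author's own statement) =====
-- stated objective: alternative
-- what changed: Replaced split()+repeated find() rescans with a single character-level scan that tracks the current word's start index and emits each (start,end) pair inline.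
import Mathlib
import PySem

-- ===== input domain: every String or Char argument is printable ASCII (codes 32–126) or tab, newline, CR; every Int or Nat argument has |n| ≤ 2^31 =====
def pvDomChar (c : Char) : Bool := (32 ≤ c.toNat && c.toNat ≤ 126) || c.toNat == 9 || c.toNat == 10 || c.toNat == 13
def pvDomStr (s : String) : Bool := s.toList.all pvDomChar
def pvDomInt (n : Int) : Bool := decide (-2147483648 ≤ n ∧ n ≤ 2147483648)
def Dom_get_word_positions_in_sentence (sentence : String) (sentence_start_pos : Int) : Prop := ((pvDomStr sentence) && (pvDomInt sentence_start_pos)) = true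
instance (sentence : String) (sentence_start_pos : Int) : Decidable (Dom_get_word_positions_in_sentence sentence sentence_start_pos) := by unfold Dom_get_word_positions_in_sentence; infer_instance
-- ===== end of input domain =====

-- B replaces split()+repeated find() with a single character scan emitting (start,end) pairs inline (alternative decomposition, same results).

-- ===== PORT A =====
def get_word_positions_in_sentence (sentence : String) (sentence_start_pos : Int) : List (Int × Int) :=
  let words := PySem.Str.split₀ sentence
  let r := words.foldl (fun (st : List (Int × Int) × Int) word =>
    if word ≠ "" then
      let word_start := PySem.Str.findFrom sentence word st.2
      if word_start ≠ -1 then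
        let abs_start := sentence_start_pos + word_start
        let abs_end := abs_start + PySem.Str.len word
        (st.1 ++ [(abs_start, abs_end)], word_start + PySem.Str.len word)
      else st
    else st) ([], 0)
  r.1

-- ===== PORT B =====
-- the loop of Source B: index i, optional word-start marker, accumulator; final flush when the string ends inside a word
def pvScanB (p : Int) : List Char → Int → Option Int → List (Int × Int) → List (Int × Int)
  | [], _, none, acc => acc
  | [], n, some s, acc => acc ++ [(p + s, p + n)]
  | c :: cs, i, none, acc =>
      if PySem.Chars.isspace c then pvScanB p cs (i + 1) none acc
      else pvScanB p cs (i + 1) (some i) acc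
  | c :: cs, i, some s, acc =>
      if PySem.Chars.isspace c then pvScanB p cs (i + 1) none (acc ++ [(p + s, p + i)])
      else pvScanB p cs (i + 1) (some s) acc

def get_word_positions_in_sentence_alt (sentence : String) (sentence_start_pos : Int) : List (Int × Int) :=
  pvScanB sentence_start_pos sentence.toList 0 none []

-- ===== PRECONDITION & SPEC =====
def Spec_get_word_positions_in_sentence (sentence : String) (sentence_start_pos : Int) (out : List (Int × Int)) : Prop := out = get_word_positions_in_sentence_alt sentence sentence_start_pos
instance (sentence : String) (sentence_start_pos : Int) (out : List (Int × Int)) : Decidable (Spec_get_word_positions_in_sentence sentence sentence_start_pos out) := by unfold Spec_get_word_positions_in_sentence; infer_instance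

-- ===== CLAIM (what is proved, stated in full; the proofs are below) =====
def Claim_equal_get_word_positions_in_sentence : Prop := ∀ (sentence : String) (sentence_start_pos : Int), Dom_get_word_positions_in_sentence sentence sentence_start_pos → Spec_get_word_positions_in_sentence sentence sentence_start_pos (get_word_positions_in_sentence sentence sentence_start_pos)

-- ===== LEMMAS AND PROOFS =====

-- tokens of cs from index k: (absolute start, word) pairs, words maximal runs of non-space chars
def pvToks (cs : List Char) (k : Nat) : List (Nat × List Char) :=
  if h : k < cs.length then
    if PySem.Chars.isspace cs[k] then pvToks cs (k + 1)
    else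
      let w := (cs.drop k).takeWhile (fun c => !PySem.Chars.isspace c)
      (k, w) :: pvToks cs (k + w.length)
  else []
  termination_by cs.length - k
  decreasing_by
  · omega
  · have hw : 0 < w.length := by
      have hd : cs.drop k = cs[k] :: cs.drop (k + 1) := List.drop_eq_getElem_cons h
      simp only [w, hd, List.takeWhile]
      simp_all
    simp only [w] at *
    omega

-- the word list alone, as a simple structural recursion
def pvWords : List Char → List (List Char)
  | [] => []
  | c :: cs =>
      if PySem.Chars.isspace c then pvWords cs
      else (c :: cs.takeWhile (fun x => !PySem.Chars.isspace x)) ::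
            pvWords (cs.dropWhile (fun x => !PySem.Chars.isspace x))
  termination_by xs => xs.length
  decreasing_by
    all_goals
      have := List.length_dropWhile_le (fun x => !PySem.Chars.isspace x) cs
      simp only [List.length_cons]
      omega

lemma pvWords_all_nonspace (l : List Char) (hne : l ≠ []) (h : ∀ c ∈ l, PySem.Chars.isspace c = false) :
    pvWords l = [l] := by
  cases l with
  | nil => simp at hne
  | cons c cs =>
    rw [pvWords]
    have hc : PySem.Chars.isspace c = false := h c (by simp)
    have htk : cs.takeWhile (fun x => !PySem.Chars.isspace x) = cs :=
      List.takeWhile_eq_self_iff.mpr (by intro a ha; simp [h a (by simp [ha])])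
    have hdw : cs.dropWhile (fun x => !PySem.Chars.isspace x) = [] :=
      List.dropWhile_eq_nil_iff.mpr (by intro a ha; simp [h a (by simp [ha])])
    simp [hc, htk, hdw, pvWords]

lemma pvWords_word_space (w : List Char) (c : Char) (rest : List Char) (hne : w ≠ [])
    (hw : ∀ x ∈ w, PySem.Chars.isspace x = false) (hc : PySem.Chars.isspace c = true) :
    pvWords (w ++ c :: rest) = w :: pvWords rest := by
  cases w with
  | nil => simp at hne
  | cons d ds =>
    have hd : PySem.Chars.isspace d = false := hw d (by simp)
    have hds : ∀ x ∈ ds, PySem.Chars.isspace x = false := fun x hx => hw x (by simp [hx])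
    rw [List.cons_append, pvWords]
    have htk : (ds ++ c :: rest).takeWhile (fun x => !PySem.Chars.isspace x) = ds := by
      rw [List.takeWhile_append]
      have : ds.takeWhile (fun x => !PySem.Chars.isspace x) = ds :=
        List.takeWhile_eq_self_iff.mpr (by intro a ha; simp [hds a ha])
      simp [this, List.takeWhile, hc]
    have hdw : (ds ++ c :: rest).dropWhile (fun x => !PySem.Chars.isspace x) = c :: rest := by
      rw [List.dropWhile_append]
      have : ds.dropWhile (fun x => !PySem.Chars.isspace x) = [] :=
        List.dropWhile_eq_nil_iff.mpr (by intro a ha; simp [hds a ha])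
      simp [this, List.dropWhile, hc]
    rw [if_neg (by simp [hd]), htk, hdw, pvWords, if_pos hc]

lemma split₀_go_eq (s : List Char) : ∀ (cur : List Char) (acc : List (List Char)),
    (∀ c ∈ cur, PySem.Chars.isspace c = false) →
    PySem.Chars.split₀.go s cur acc = acc.reverse ++ pvWords (cur.reverse ++ s) := by
  induction s with
  | nil =>
    intro cur acc hcur
    rw [PySem.Chars.split₀.go]
    by_cases hc : cur = []
    · simp [hc, pvWords]
    · have : pvWords cur.reverse = [cur.reverse] :=
        pvWords_all_nonspace _ (by simpa using hc) (by intro c hc'; exact hcur c (by simpa using hc'))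
      simp [hc, this]
  | cons c rest ih =>
    intro cur acc hcur
    rw [PySem.Chars.split₀.go]
    by_cases hsp : PySem.Chars.isspace c = true
    · rw [if_pos hsp]
      by_cases hc : cur = []
      · subst hc
        simp only [List.isEmpty_nil, if_pos]
        rw [ih [] acc (by simp)]
        simp [pvWords, hsp]
      · rw [if_neg (by simpa using hc)]
        rw [ih [] (cur.reverse :: acc) (by simp)]
        rw [pvWords_word_space cur.reverse c rest (by simpa using hc)
              (by intro x hx; exact hcur x (by simpa using hx)) hsp]
        simp
    · rw [if_neg hsp]
      rw [ih (c :: cur) acc (by intro x hx; rcases List.mem_cons.mp hx with h | h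
                                · subst h; simpa using hsp
                                · exact hcur x h)]
      simp

lemma split₀_eq_pvWords (cs : List Char) : PySem.Chars.split₀ cs = pvWords cs := by
  have := split₀_go_eq cs [] [] (by simp)
  simpa [PySem.Chars.split₀] using this

lemma pv_dropWhile_eq_drop (p : Char → Bool) (xs : List Char) :
    xs.dropWhile p = xs.drop (xs.takeWhile p).length := by
  induction xs with
  | nil => rfl
  | cons c cs ih => by_cases h : p c <;> simp [List.dropWhile, List.takeWhile, h, ih]

lemma pvWords_eq_toks (cs : List Char) : ∀ k, k ≤ cs.length →
    pvWords (cs.drop k) = (pvToks cs k).map Prod.snd := by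
  intro k hk
  fun_induction pvToks cs k with
  | case1 k h hsp ih =>
    rw [List.drop_eq_getElem_cons h, pvWords, if_pos hsp]
    exact ih (by omega)
  | case2 k h hsp w ih =>
    have hdrop : cs.drop k = cs[k] :: cs.drop (k + 1) := List.drop_eq_getElem_cons h
    have hwlen : w.length ≤ (cs.drop k).length :=
      (List.takeWhile_prefix (fun c => !PySem.Chars.isspace c)).length_le
    have hk' : k + w.length ≤ cs.length := by simp [List.length_drop] at hwlen; omega
    have hwc : w = cs[k] :: (cs.drop (k + 1)).takeWhile (fun c => !PySem.Chars.isspace c) := by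
      simp only [w]
      rw [hdrop, List.takeWhile_cons]
      simp [hsp]
    have htail : (cs.drop (k + 1)).dropWhile (fun c => !PySem.Chars.isspace c) = cs.drop (k + w.length) := by
      have h1 : (cs.drop k).dropWhile (fun c => !PySem.Chars.isspace c)
          = (cs.drop (k + 1)).dropWhile (fun c => !PySem.Chars.isspace c) := by
        rw [hdrop, List.dropWhile_cons]
        simp [hsp]
      rw [← h1, pv_dropWhile_eq_drop, ← List.drop_drop]
    rw [hdrop, pvWords, if_neg (by simp [hsp])]
    simp only [List.map_cons]
    refine List.cons_eq_cons.mpr ⟨hwc.symm, ?_⟩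
    rw [htail]
    exact ih hk'
  | case3 k h =>
    have hnil : cs.drop k = [] := List.drop_eq_nil_of_le (by omega)
    rw [hnil, pvWords]
    simp

-- scan in the in-word state: consume the non-space run, keeping the marker
lemma pvScanB_some (p : Int) : ∀ (rest : List Char) (i s : Int) (acc : List (Int × Int)),
    pvScanB p rest i (some s) acc =
      pvScanB p (rest.dropWhile (fun c => !PySem.Chars.isspace c))
        (i + ((rest.takeWhile (fun c => !PySem.Chars.isspace c)).length : Int)) (some s) acc := by
  intro rest
  induction rest with
  | nil => intro i s acc; simp [List.takeWhile, List.dropWhile]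
  | cons c cs ih =>
    intro i s acc
    by_cases hsp : PySem.Chars.isspace c = true
    · simp [pvScanB, hsp, List.takeWhile, List.dropWhile]
    · have hsp' : PySem.Chars.isspace c = false := by simpa using hsp
      rw [pvScanB]
      rw [if_neg (by simp [hsp'])]
      rw [ih (i + 1) s acc]
      rw [List.takeWhile_cons, List.dropWhile_cons]
      simp only [hsp', Bool.not_false, if_true]
      congr 1
      rw [List.length_cons]
      push_cast
      ring

lemma pv_dropWhile_head_false (p : Char → Bool) : ∀ (l : List Char) (a : Char) (l' : List Char),
    l.dropWhile p = a :: l' → p a = false := by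
  intro l
  induction l with
  | nil => intro a l' h; simp [List.dropWhile] at h
  | cons c cs ih =>
    intro a l' h
    by_cases hc : p c
    · rw [List.dropWhile_cons, if_pos hc] at h
      exact ih a l' h
    · rw [List.dropWhile_cons, if_neg hc] at h
      obtain ⟨rfl, -⟩ := List.cons_eq_cons.mp h
      simpa using hc

lemma pvScanB_toks (cs : List Char) (p : Int) : ∀ k, k ≤ cs.length → ∀ acc,
    pvScanB p (cs.drop k) (k : Int) none acc =
      acc ++ (pvToks cs k).map (fun t => (p + (t.1 : Int), p + (t.1 : Int) + (t.2.length : Int))) := by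
  intro k hk
  fun_induction pvToks cs k with
  | case1 k h hsp ih =>
    intro acc
    rw [List.drop_eq_getElem_cons h, pvScanB, if_pos hsp]
    have hcast : ((k : Int) + 1) = ((k + 1 : Nat) : Int) := by push_cast; ring
    rw [hcast]
    exact ih (by omega) acc
  | case2 k h hsp w ih =>
    intro acc
    have hdrop : cs.drop k = cs[k] :: cs.drop (k + 1) := List.drop_eq_getElem_cons h
    have hwlen : w.length ≤ (cs.drop k).length :=
      (List.takeWhile_prefix (fun c => !PySem.Chars.isspace c)).length_le
    have hk' : k + w.length ≤ cs.length := by simp [List.length_drop] at hwlen; omega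
    have hwc : w = cs[k] :: (cs.drop (k + 1)).takeWhile (fun c => !PySem.Chars.isspace c) := by
      simp only [w]
      rw [hdrop, List.takeWhile_cons]
      simp [hsp]
    have hlen : w.length = ((cs.drop (k + 1)).takeWhile (fun c => !PySem.Chars.isspace c)).length + 1 := by
      rw [hwc]; simp
    have htail : (cs.drop (k + 1)).dropWhile (fun c => !PySem.Chars.isspace c) = cs.drop (k + w.length) := by
      have h1 : (cs.drop k).dropWhile (fun c => !PySem.Chars.isspace c)
          = (cs.drop (k + 1)).dropWhile (fun c => !PySem.Chars.isspace c) := by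
        rw [hdrop, List.dropWhile_cons]
        simp [hsp]
      rw [← h1, pv_dropWhile_eq_drop, ← List.drop_drop]
    rw [hdrop, pvScanB, if_neg (by simp [hsp]), pvScanB_some, htail]
    have hidx : (k : Int) + 1 + ((cs.drop (k + 1)).takeWhile (fun c => !PySem.Chars.isspace c)).length
        = ((k + w.length : Nat) : Int) := by
      rw [hlen]; push_cast; ring
    rw [hidx]
    cases hrest : cs.drop (k + w.length) with
    | nil =>
      have hlen2 : k + w.length = cs.length := by
        have := congrArg List.length hrest
        simp [List.length_drop] at this
        omega
      rw [pvScanB]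
      rw [pvToks, dif_neg (by omega)]
      simp
      omega
    | cons d rest' =>
      have hd : PySem.Chars.isspace d = true := by
        have hstep : (cs.drop k).dropWhile (fun c => !PySem.Chars.isspace c) = d :: rest' := by
          rw [pv_dropWhile_eq_drop, List.drop_drop]
          exact hrest
        have := pv_dropWhile_head_false _ _ _ _ hstep
        simpa using this
      rw [pvScanB, if_pos hd]
      have hih := ih hk' (acc ++ [(p + (k : Int), p + ((k + w.length : Nat) : Int))])
      rw [hrest, pvScanB, if_pos hd] at hih
      rw [hih]
      simp only [List.map_cons]
      push_cast
      simp [List.append_assoc]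
      ring
  | case3 k h =>
    intro acc
    have hnil : cs.drop k = [] := List.drop_eq_nil_of_le (by omega)
    rw [hnil, pvScanB]
    simp

-- A's loop body, on the char-list side
def pvFA (cs : List Char) (p : Int) (st : List (Int × Int) × Int) (word : List Char) : List (Int × Int) × Int :=
  if word ≠ [] then
    let word_start := PySem.Chars.findFrom cs word st.2
    if word_start ≠ -1 then
      (st.1 ++ [(p + word_start, p + word_start + (word.length : Int))], word_start + (word.length : Int))
    else st
  else st

lemma find_eq_of_first (s sub : List Char) (m : Nat)
    (h1 : sub <+: s.drop m) (h2 : ∀ i, i < m → ¬ sub <+: s.drop i) :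
    PySem.Chars.find s sub = (m : Int) := by
  have hinf : sub <:+: s := h1.isInfix.trans (List.drop_suffix m s).isInfix
  have hpos : 0 ≤ PySem.Chars.find s sub := (PySem.Chars.find_nonneg_iff s sub).mpr hinf
  obtain ⟨hpre, hmin⟩ := PySem.Chars.find_spec hpos
  have ht : (PySem.Chars.find s sub).toNat = m := by
    by_contra hne
    rcases Nat.lt_or_ge (PySem.Chars.find s sub).toNat m with hlt | hge
    · exact h2 _ hlt hpre
    · exact hmin m (by omega) h1
  omega

lemma findFrom_key (cs w : List Char) (pos k : Nat) (hpk : pos ≤ k) (hk : k < cs.length)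
    (hsp : ∀ j, pos ≤ j → j < k → ∀ h : j < cs.length, PySem.Chars.isspace cs[j] = true)
    (hw : w = (cs.drop k).takeWhile (fun c => !PySem.Chars.isspace c))
    (hns : PySem.Chars.isspace cs[k] = false) :
    PySem.Chars.findFrom cs w (pos : Int) = (k : Int) := by
  have hdrop : cs.drop k = cs[k] :: cs.drop (k + 1) := List.drop_eq_getElem_cons hk
  have hwcons : ∃ tl, w = cs[k] :: tl := by
    refine ⟨(cs.drop (k + 1)).takeWhile (fun c => !PySem.Chars.isspace c), ?_⟩
    rw [hw, hdrop, List.takeWhile, hns]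
    simp
  have hfind : PySem.Chars.find (cs.drop pos) w = ((k - pos : Nat) : Int) := by
    apply find_eq_of_first
    · rw [List.drop_drop]
      have : pos + (k - pos) = k := by omega
      rw [this, hw]
      exact List.takeWhile_prefix _
    · intro i hi hpre
      obtain ⟨tl, htl⟩ := hwcons
      rw [List.drop_drop] at hpre
      have hlt : pos + i < cs.length := by omega
      have : cs.drop (pos + i) = cs[pos + i] :: cs.drop (pos + i + 1) := List.drop_eq_getElem_cons hlt
      rw [this, htl] at hpre
      have heq : cs[k] = cs[pos + i] := by
        obtain ⟨t, ht⟩ := hpre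
        rw [List.cons_append] at ht
        exact (List.cons_eq_cons.mp ht).1
      have := hsp (pos + i) (by omega) (by omega) hlt
      rw [← heq, hns] at this
      exact absurd this (by simp)
  rw [PySem.Chars.findFrom_natCast cs w pos (by omega), hfind]
  have : ((k - pos : Nat) : Int) ≠ -1 := by omega
  rw [if_neg this]
  omega

lemma foldA_toks (cs : List Char) (p : Int) : ∀ k, k ≤ cs.length → ∀ (pos : Nat) (acc : List (Int × Int)),
    pos ≤ k → (∀ j, pos ≤ j → j < k → ∀ h : j < cs.length, PySem.Chars.isspace cs[j] = true) →
    ∃ q, List.foldl (pvFA cs p) (acc, (pos : Int)) ((pvToks cs k).map Prod.snd) =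
      (acc ++ (pvToks cs k).map (fun t => (p + (t.1 : Int), p + (t.1 : Int) + (t.2.length : Int))), q) := by
  intro k hk
  fun_induction pvToks cs k with
  | case1 k h hsp ih =>
    intro pos acc hpos hspaces
    refine ih (by omega) pos acc (by omega) ?_
    intro j h1 h2 hj
    by_cases hjk : j < k
    · exact hspaces j h1 hjk hj
    · have : j = k := by omega
      subst this
      exact hsp
  | case2 k h hsp w ih =>
    intro pos acc hpos hspaces
    have hdrop : cs.drop k = cs[k] :: cs.drop (k + 1) := List.drop_eq_getElem_cons h
    have hwlen : w.length ≤ (cs.drop k).length :=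
      (List.takeWhile_prefix (fun c => !PySem.Chars.isspace c)).length_le
    have hk' : k + w.length ≤ cs.length := by simp [List.length_drop] at hwlen; omega
    have hwc : w = cs[k] :: (cs.drop (k + 1)).takeWhile (fun c => !PySem.Chars.isspace c) := by
      simp only [w]
      rw [hdrop, List.takeWhile_cons]
      simp [hsp]
    have hne : w ≠ [] := by rw [hwc]; simp
    have hfind : PySem.Chars.findFrom cs w (pos : Int) = (k : Int) :=
      findFrom_key cs w pos k hpos h hspaces rfl (by simpa using hsp)
    have hstep : pvFA cs p (acc, (pos : Int)) w
        = (acc ++ [(p + (k : Int), p + (k : Int) + (w.length : Int))], (k : Int) + (w.length : Int)) := by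
      have hk1 : ((k : Nat) : Int) ≠ -1 := by omega
      simp [pvFA, hne, hfind, hk1]
    simp only [List.map_cons, List.foldl_cons, hstep]
    have hcast : ((k : Int) + (w.length : Int)) = ((k + w.length : Nat) : Int) := by push_cast; ring
    rw [hcast]
    obtain ⟨q, hq⟩ := ih hk' (k + w.length) (acc ++ [(p + (k : Int), p + (k : Int) + (w.length : Int))])
      le_rfl (by intro j h1 h2 hj; omega)
    refine ⟨q, ?_⟩
    rw [hq]
    simp [List.append_assoc]
  | case3 k h =>
    intro pos acc hpos hspaces
    exact ⟨(pos : Int), by simp⟩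

lemma portA_eq (s : String) (p : Int) :
    get_word_positions_in_sentence s p
      = (List.foldl (pvFA s.toList p) ([], 0) (PySem.Chars.split₀ s.toList)).1 := by
  unfold get_word_positions_in_sentence
  rw [← PySem.Str.split₀_map_toList, List.foldl_map]
  refine congrArg Prod.fst (PySem.List.foldl_congr_mem _ _ _ _ ?_)
  intro st word _
  by_cases hw : word = ""
  · subst hw
    simp [pvFA]
  · have hl : word.toList ≠ [] := by
      intro hc
      exact hw (by
        have := congrArg String.ofList hc
        simpa [String.ofList_toList] using this)
    simp [pvFA, hw, hl, PySem.Str.findFrom_eq, PySem.Str.len_eq]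

-- ===== VERDICT (by name: the statement is the Claim_ definition above) =====
theorem get_word_positions_in_sentence_spec : Claim_equal_get_word_positions_in_sentence := by
  intro sentence p _
  unfold Spec_get_word_positions_in_sentence
  rw [portA_eq, split₀_eq_pvWords]
  have hw := pvWords_eq_toks sentence.toList 0 (by omega)
  rw [List.drop_zero] at hw
  rw [hw]
  obtain ⟨q, hq⟩ := foldA_toks sentence.toList p 0 (by omega) 0 [] le_rfl (by intro j h1 h2 hj; omega)
  rw [Nat.cast_zero] at hq
  rw [hq]
  have hb := pvScanB_toks sentence.toList p 0 (by omega) []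
  rw [List.drop_zero, Nat.cast_zero] at hb
  unfold get_word_positions_in_sentence_alt
  rw [hb]
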